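-- pv_equiv track=rewrite | github.com/SreehariPreman/IntelliNotes-AI-Notes-Generator | server.py | format_text_to_html
-- ===== SOURCE A (Python) =====
-- def format_text_to_html(text):
--     formatted_text = ""
--     current_heading = None
--
--     for line in text.split('\n'):
--         line = line.strip()
--         if not line:
--             continue
--
--         if line.startswith("-"):
--             if current_heading:
--                 formatted_text += "</ul>"
--             formatted_text += "<b>" + line.strip('- ') + "</b><br>"
--             current_heading = line.strip('- ')
--             formatted_text += "<ul>"
--         elif line.startswith("    -"):
--             formatted_text += "<li>" + line.strip(' -') + "</li>"
--         elif line.startswith("    "):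
--             formatted_text += "<li>" + line.strip() + "</li>"
--
--     if current_heading:
--         formatted_text += "</ul>"
--
--     return formatted_text
-- ===== SOURCE B (Python) =====
-- def format_text_to_html(text):
--     headings = [s.strip('- ') for s in (line.strip() for line in text.split('\n'))
--                 if s.startswith('-')]
--     return ''.join('<b>' + h + '</b><br><ul></ul>' for h in headings)
-- ===== Notes on version B (the rewrite author's own statement) =====
-- stated objective: simpler
-- what changed: B replaces A's stateful loop (current_heading flag, deferred '</ul>' closes, dead indented-item branches — each line is stripped before the tests) by one comprehension that extracts the headings and a join emitting a fixed '<b>…</b><br><ul></ul>' block per heading.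
-- intended difference: On texts containing a line that strips to only dashes and spaces (an empty heading), A's truthiness test on the empty heading string skips the matching closing ul tag and returns unbalanced HTML, while B returns the intended balanced block with the ul tag immediately closed. — e.g. on format_text_to_html("-"): A returns "<b></b><br><ul>", B returns "<b></b><br><ul></ul>"
import Mathlib
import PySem

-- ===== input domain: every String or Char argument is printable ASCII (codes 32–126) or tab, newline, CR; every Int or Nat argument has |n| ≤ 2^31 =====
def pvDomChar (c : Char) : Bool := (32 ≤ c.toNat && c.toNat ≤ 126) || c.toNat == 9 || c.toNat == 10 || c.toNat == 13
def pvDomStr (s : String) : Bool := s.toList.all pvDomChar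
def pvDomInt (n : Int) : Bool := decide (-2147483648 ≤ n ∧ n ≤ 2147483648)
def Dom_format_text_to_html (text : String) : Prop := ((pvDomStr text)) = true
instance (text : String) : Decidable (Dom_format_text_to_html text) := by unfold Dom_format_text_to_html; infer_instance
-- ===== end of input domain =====

-- B extracts the headings with one comprehension and joins a fixed '<b>…</b><br><ul></ul>' block per
-- heading (simpler than A's stateful loop with deferred tag closes; A's indented-item branches are
-- dead code because each line is stripped first).  On lines that strip to an empty heading A emits
-- unbalanced HTML; B closes the tag there (see D_ below).

-- ===== PORT A =====
-- Python truthiness of `current_heading` (None or "" is falsy)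
def pvTruthy (h : Option (List Char)) : Bool :=
  match h with
  | none => false
  | some s => !s.isEmpty

def fmtStepA (st : List Char × Option (List Char)) (raw : List Char) : List Char × Option (List Char) :=
  let line := PySem.Chars.strip raw
  if line = [] then st
  else if PySem.Chars.startswith line ['-'] then
    let ft := (if pvTruthy st.2 then st.1 ++ "</ul>".toList else st.1)
      ++ "<b>".toList ++ PySem.Chars.stripChars line ['-', ' '] ++ "</b><br>".toList
      ++ "<ul>".toList
    (ft, some (PySem.Chars.stripChars line ['-', ' ']))
  else if PySem.Chars.startswith line "    -".toList then
    (st.1 ++ "<li>".toList ++ PySem.Chars.stripChars line [' ', '-'] ++ "</li>".toList, st.2)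
  else if PySem.Chars.startswith line "    ".toList then
    (st.1 ++ "<li>".toList ++ PySem.Chars.strip line ++ "</li>".toList, st.2)
  else st

def format_text_to_html (text : String) : String :=
  let fin := (PySem.Chars.splitOn text.toList ['\n']).foldl fmtStepA ([], none)
  String.ofList (if pvTruthy fin.2 then fin.1 ++ "</ul>".toList else fin.1)

-- ===== PORT B =====
-- the comprehension: strip each line, keep those starting with '-', strip '- ' off
def pvHeadings (ls : List (List Char)) : List (List Char) :=
  (ls.map PySem.Chars.strip).filterMap
    (fun s => if PySem.Chars.startswith s ['-'] then some (PySem.Chars.stripChars s ['-', ' ']) else none)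

def format_text_to_html_alt (text : String) : String :=
  String.ofList (PySem.Chars.join []
    ((pvHeadings (PySem.Chars.splitOn text.toList ['\n'])).map
      (fun h => "<b>".toList ++ h ++ "</b><br><ul></ul>".toList)))

-- ===== PRECONDITION & SPEC =====
-- On texts with a line that strips to only dashes/spaces (an empty heading), A's truthiness test on the
-- empty heading string skips the matching closing ul tag and returns unbalanced HTML, while B emits the
-- intended balanced block with the ul tag immediately closed.
def D_format_text_to_html (text : String) : Prop :=
  ∃ l ∈ PySem.Chars.splitOn text.toList ['\n'],
    PySem.Chars.startswith (PySem.Chars.strip l) ['-'] = true ∧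
    PySem.Chars.stripChars (PySem.Chars.strip l) ['-', ' '] = []

instance (text : String) : Decidable (D_format_text_to_html text) := by
  unfold D_format_text_to_html; infer_instance

def Spec_format_text_to_html (text : String) (out : String) : Prop :=
  ¬ D_format_text_to_html text → out = format_text_to_html_alt text

instance (text : String) (out : String) : Decidable (Spec_format_text_to_html text out) := by
  unfold Spec_format_text_to_html; infer_instance

def pvDiffWitness_format_text_to_html : String := "-"

def pvDiffWitnessOut_format_text_to_html : String × String :=
  ("<b></b><br><ul>", "<b></b><br><ul></ul>")

-- ===== CLAIM =====
def Claim_unchanged_format_text_to_html : Prop :=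
  ∀ (text : String), Dom_format_text_to_html text →
    Spec_format_text_to_html text (format_text_to_html text)

def Claim_changed_format_text_to_html : Prop :=
  Dom_format_text_to_html (pvDiffWitness_format_text_to_html) ∧
  D_format_text_to_html (pvDiffWitness_format_text_to_html) ∧
  format_text_to_html (pvDiffWitness_format_text_to_html) = pvDiffWitnessOut_format_text_to_html.1 ∧
  format_text_to_html_alt (pvDiffWitness_format_text_to_html) = pvDiffWitnessOut_format_text_to_html.2 ∧
  pvDiffWitnessOut_format_text_to_html.1 ≠ pvDiffWitnessOut_format_text_to_html.2

def Claim_exact_format_text_to_html : Prop :=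
  ∀ (text : String), Dom_format_text_to_html text → D_format_text_to_html text →
    format_text_to_html text ≠ format_text_to_html_alt text

-- ===== LEMMAS AND PROOFS =====

-- the final close of A's loop, applied to the loop state
def pvFin (st : List Char × Option (List Char)) : List Char :=
  if pvTruthy st.2 then st.1 ++ "</ul>".toList else st.1

-- B's output on a list of raw lines
def pvBlocks (ls : List (List Char)) : List Char :=
  PySem.Chars.join [] ((pvHeadings ls).map (fun h => "<b>".toList ++ h ++ "</b><br><ul></ul>".toList))

lemma pvJoin_nil_flatten (xs : List (List Char)) : PySem.Chars.join [] xs = xs.flatten := by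
  induction xs with
  | nil => rfl
  | cons a t ih =>
    cases t with
    | nil => simp [PySem.Chars.join, List.intercalate]
    | cons b r =>
      rw [PySem.Chars.join_cons_cons] at *
      simp_all [PySem.Chars.join]

lemma head_dropWhile_false (p : Char → Bool) (l : List Char) (c : Char) (t : List Char)
    (h : l.dropWhile p = c :: t) : p c = false := by
  have h2 : (l.dropWhile p).head (by simp [h]) = c := by simp [h]
  have := List.head_dropWhile_not (p := p) (l := l) (by simp [h])
  rw [h2] at this; simpa using this

-- a nonempty stripped line does not start with a space
lemma strip_head_not_space (l : List Char) (c : Char) (t : List Char)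
    (h : PySem.Chars.strip l = c :: t) : PySem.Chars.isspace c = false := by
  have hpre : PySem.Chars.strip l <+: PySem.Chars.lstrip l := by
    unfold PySem.Chars.strip PySem.Chars.rstrip
    exact List.reverse_suffix.mp (by simpa using List.dropWhile_suffix (l := (PySem.Chars.lstrip l).reverse) PySem.Chars.isspace)
  rw [h] at hpre
  obtain ⟨t2, ht2⟩ := hpre
  exact head_dropWhile_false PySem.Chars.isspace l c (t ++ t2) (by simpa [PySem.Chars.lstrip] using ht2.symm)

lemma pvBlocks_nil : pvBlocks [] = [] := rfl

lemma pvBlocks_cons (l : List Char) (ls : List (List Char)) :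
    pvBlocks (l :: ls) =
      (if PySem.Chars.startswith (PySem.Chars.strip l) ['-'] = true then
        "<b>".toList ++ PySem.Chars.stripChars (PySem.Chars.strip l) ['-', ' '] ++ "</b><br><ul></ul>".toList
      else []) ++ pvBlocks ls := by
  unfold pvBlocks pvHeadings
  rw [pvJoin_nil_flatten, pvJoin_nil_flatten]
  simp only [List.map_cons, List.filterMap_cons]
  split_ifs with hs <;> simp

lemma startswith_indent_false (l : List Char) (h0 : PySem.Chars.strip l ≠ [])
    (pre : List Char) (hpre : pre.head? = some ' ') :
    PySem.Chars.startswith (PySem.Chars.strip l) pre = false := by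
  cases hc : PySem.Chars.strip l with
  | nil => exact absurd hc h0
  | cons c t =>
    cases pre with
    | nil => simp at hpre
    | cons p ps =>
      have hp : p = ' ' := by simpa using hpre
      subst hp
      have hns := strip_head_not_space l c t hc
      by_contra hh
      have : (' ' :: ps).isPrefixOf (c :: t) = true := by
        simpa [PySem.Chars.startswith] using hh
      have hce : c = ' ' := by
        rcases (List.isPrefixOf_iff_prefix.mp this) with ⟨t2, ht2⟩
        exact (List.cons.injEq .. ▸ ht2.symm).1.symm ▸ rfl
      rw [hce] at hns
      exact absurd hns (by decide)

lemma loop_eq (ls : List (List Char)) (acc : List Char) (cur : Option (List Char))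
    (h : ∀ l ∈ ls, PySem.Chars.startswith (PySem.Chars.strip l) ['-'] = true →
         PySem.Chars.stripChars (PySem.Chars.strip l) ['-', ' '] ≠ []) :
    pvFin (ls.foldl fmtStepA (acc, cur)) = pvFin (acc, cur) ++ pvBlocks ls := by
  induction ls generalizing acc cur with
  | nil => simp [pvBlocks_nil]
  | cons l ls ih =>
    rw [List.foldl_cons, pvBlocks_cons]
    by_cases h0 : PySem.Chars.strip l = []
    · have hs : PySem.Chars.startswith (PySem.Chars.strip l) ['-'] = false := by
        rw [h0]; decide
      rw [fmtStepA, if_pos h0]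
      rw [ih acc cur (fun x hx => h x (List.mem_cons_of_mem _ hx)), hs]
      simp
    · by_cases hs : PySem.Chars.startswith (PySem.Chars.strip l) ['-'] = true
      · have hne := h l (List.mem_cons_self) hs
        rw [fmtStepA, if_neg h0, if_pos hs]
        rw [ih _ _ (fun x hx => h x (List.mem_cons_of_mem _ hx)), hs]
        have htr : pvTruthy (some (PySem.Chars.stripChars (PySem.Chars.strip l) ['-', ' '])) = true := by
          simp [pvTruthy, hne]
        simp only [pvFin, htr, if_true]
        split_ifs <;> simp
      · have h5 := startswith_indent_false l h0 [' ', ' ', ' ', ' ', '-'] (by rfl)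
        have h4 := startswith_indent_false l h0 [' ', ' ', ' ', ' '] (by rfl)
        rw [fmtStepA, if_neg h0, if_neg hs, if_neg (by simp [h5]), if_neg (by simp [h4])]
        rw [ih acc cur (fun x hx => h x (List.mem_cons_of_mem _ hx))]
        simp [hs]

-- number of empty-heading lines: each one costs A exactly one 5-character closing tag relative to B
def pvECnt (ls : List (List Char)) : Nat :=
  ls.countP (fun l => PySem.Chars.startswith (PySem.Chars.strip l) ['-']
    && (PySem.Chars.stripChars (PySem.Chars.strip l) ['-', ' ']).isEmpty)

lemma loop_len (ls : List (List Char)) (acc : List Char) (cur : Option (List Char)) :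
    (pvFin (ls.foldl fmtStepA (acc, cur))).length + 5 * pvECnt ls
      = (pvFin (acc, cur)).length + (pvBlocks ls).length := by
  induction ls generalizing acc cur with
  | nil => simp [pvBlocks_nil, pvECnt]
  | cons l ls ih =>
    rw [List.foldl_cons, pvBlocks_cons]
    have hcnt : pvECnt (l :: ls) = pvECnt ls +
        (if PySem.Chars.startswith (PySem.Chars.strip l) ['-']
            && (PySem.Chars.stripChars (PySem.Chars.strip l) ['-', ' ']).isEmpty then 1 else 0) := by
      simp [pvECnt, List.countP_cons]
    by_cases h0 : PySem.Chars.strip l = []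
    · have hs : PySem.Chars.startswith (PySem.Chars.strip l) ['-'] = false := by
        rw [h0]; decide
      have hstep : fmtStepA (acc, cur) l = (acc, cur) := by simp [fmtStepA, h0]
      rw [hstep, hcnt, hs]
      have IH := ih acc cur
      simp; omega
    · by_cases hs : PySem.Chars.startswith (PySem.Chars.strip l) ['-'] = true
      · have hstep : fmtStepA (acc, cur) l =
            ((if pvTruthy cur = true then acc ++ "</ul>".toList else acc)
              ++ "<b>".toList ++ PySem.Chars.stripChars (PySem.Chars.strip l) ['-', ' ']
              ++ "</b><br>".toList ++ "<ul>".toList,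
             some (PySem.Chars.stripChars (PySem.Chars.strip l) ['-', ' '])) := by
          simp [fmtStepA, h0, hs]
        rw [hstep, hcnt, hs]
        have IH := ih ((if pvTruthy cur = true then acc ++ "</ul>".toList else acc)
              ++ "<b>".toList ++ PySem.Chars.stripChars (PySem.Chars.strip l) ['-', ' ']
              ++ "</b><br>".toList ++ "<ul>".toList)
            (some (PySem.Chars.stripChars (PySem.Chars.strip l) ['-', ' ']))
        by_cases hh : PySem.Chars.stripChars (PySem.Chars.strip l) ['-', ' '] = []
        · simp [pvFin, pvTruthy, hh] at IH ⊢
          omega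
        · simp [pvFin, pvTruthy, hh] at IH ⊢
          split_ifs at IH ⊢ <;> simp_all <;> omega
      · have h5 := startswith_indent_false l h0 [' ', ' ', ' ', ' ', '-'] (by rfl)
        have h4 := startswith_indent_false l h0 [' ', ' ', ' ', ' '] (by rfl)
        have hstep : fmtStepA (acc, cur) l = (acc, cur) := by
          simp [fmtStepA, h0, hs, h5, h4]
        rw [hstep, hcnt]
        have IH := ih acc cur
        simp [hs]; omega

-- ===== VERDICT =====
theorem format_text_to_html_spec : Claim_unchanged_format_text_to_html := by
  intro text _ hnd
  unfold D_format_text_to_html at hnd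
  unfold format_text_to_html format_text_to_html_alt
  have h : ∀ l ∈ PySem.Chars.splitOn text.toList ['\n'],
      PySem.Chars.startswith (PySem.Chars.strip l) ['-'] = true →
      PySem.Chars.stripChars (PySem.Chars.strip l) ['-', ' '] ≠ [] := by
    intro l hl hst hemp
    exact hnd ⟨l, hl, hst, hemp⟩
  have := loop_eq (PySem.Chars.splitOn text.toList ['\n']) [] none h
  simp only [pvFin, pvTruthy, if_false, Bool.false_eq_true, List.nil_append] at this
  exact congrArg String.ofList this

theorem format_text_to_html_tight : Claim_exact_format_text_to_html := by
  intro text _ hD hEq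
  unfold D_format_text_to_html at hD
  obtain ⟨l, hl, hst, hemp⟩ := hD
  have hcnt : 0 < pvECnt (PySem.Chars.splitOn text.toList ['\n']) := by
    rw [pvECnt, List.countP_pos_iff]; exact ⟨l, hl, by simp [hst, hemp]⟩
  have hlen := loop_len (PySem.Chars.splitOn text.toList ['\n']) [] none
  have hlists : pvFin ((PySem.Chars.splitOn text.toList ['\n']).foldl fmtStepA ([], none))
      = pvBlocks (PySem.Chars.splitOn text.toList ['\n']) := by
    have := congrArg String.toList hEq
    simpa [format_text_to_html, format_text_to_html_alt, pvFin, pvBlocks, pvHeadings] using this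
  rw [hlists] at hlen
  simp [pvFin, pvTruthy] at hlen
  omega

theorem format_text_to_html_changed : Claim_changed_format_text_to_html := by
  unfold Claim_changed_format_text_to_html; decide
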